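-- pv_equiv track=rewrite | github.com/ashish-sarvam/evals-sovg-samvaad | tota-benchmarking/scripts/benchmark_analysis/comparitive_analysis.py | get_analysis_results
-- ===== SOURCE A (Python) =====
-- def get_analysis_results(model_1_samples, model_2_samples):
--     both_failed = []
--     model_1_failed = []
--     model_2_failed = []
--     both_passed = []
--
--     for sample_id, model_1_result in model_1_samples.items():
--         model_1_has_failed = model_1_result["has_failed"]
--         model_2_has_failed = model_2_samples[sample_id]["has_failed"]
--
--         if model_1_has_failed and model_2_has_failed:
--             both_failed.append(sample_id)
--         elif model_1_has_failed:
--             model_1_failed.append(sample_id)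
--         elif model_2_has_failed:
--             model_2_failed.append(sample_id)
--         else:
--             both_passed.append(sample_id)
--
--     return {
--         "both_failed": both_failed,
--         "model_1_failed": model_1_failed,
--         "model_2_failed": model_2_failed,
--         "both_passed": both_passed,
--     }
-- ===== SOURCE B (Python) =====
-- def get_analysis_results(model_1_samples, model_2_samples):
--     # Four independent filtered passes instead of one branching loop.
--     def f1(r):
--         return bool(r["has_failed"])
--
--     def f2(sid):
--         return bool(model_2_samples[sid]["has_failed"])
--
--     return {
--         "both_failed": [s for s, r in model_1_samples.items() if f1(r) and f2(s)],
--         "model_1_failed": [s for s, r in model_1_samples.items() if f1(r) and not f2(s)],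
--         "model_2_failed": [s for s, r in model_1_samples.items() if not f1(r) and f2(s)],
--         "both_passed": [s for s, r in model_1_samples.items() if not f1(r) and not f2(s)],
--     }
-- ===== Notes on version B (the rewrite author's own statement) =====
-- stated objective: alternative
-- what changed: Replaces the single if/elif branching loop with four accumulators by four independent filtered passes over model_1_samples.items(), one exclusive predicate per bucket.
import Mathlib
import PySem

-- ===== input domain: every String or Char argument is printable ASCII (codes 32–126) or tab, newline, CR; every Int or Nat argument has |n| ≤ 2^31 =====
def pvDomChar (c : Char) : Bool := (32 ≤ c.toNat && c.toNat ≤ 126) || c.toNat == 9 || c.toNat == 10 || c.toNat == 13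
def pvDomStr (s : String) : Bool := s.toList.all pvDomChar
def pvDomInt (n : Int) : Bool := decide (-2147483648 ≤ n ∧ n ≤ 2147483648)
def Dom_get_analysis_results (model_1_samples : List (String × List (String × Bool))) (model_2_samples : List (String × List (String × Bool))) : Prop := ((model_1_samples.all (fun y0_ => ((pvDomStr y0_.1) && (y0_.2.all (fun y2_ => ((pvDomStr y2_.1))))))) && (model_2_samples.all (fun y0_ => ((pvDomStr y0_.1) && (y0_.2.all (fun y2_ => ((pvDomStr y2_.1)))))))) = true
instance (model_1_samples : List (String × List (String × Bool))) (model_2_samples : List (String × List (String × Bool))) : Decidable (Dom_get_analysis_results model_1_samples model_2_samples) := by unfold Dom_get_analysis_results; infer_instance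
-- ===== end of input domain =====

-- B replaces A's single if/elif partitioning loop by four independent filtered passes
-- (one exclusive predicate per bucket); same return value, no speed claim.

-- shared dict-lookup primitive: Python d[k] (first match; none = KeyError, excluded by Pre_)
def pvGet? {α : Type} (d : List (String × α)) (k : String) : Option α :=
  match d with
  | [] => none
  | (k', v) :: rest => if k' == k then some v else pvGet? rest k

-- ===== PORT A =====
-- the loop body of A's single for-loop (state: the four accumulator lists)
def pvStepA (model_2_samples : List (String × List (String × Bool)))
    (acc : List String × List String × List String × List String)
    (p : String × List (String × Bool)) :
    List String × List String × List String × List String :=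
  let (bf, m1f, m2f, bp) := acc
  let f1 := (pvGet? p.2 "has_failed").getD false
  let f2 := (pvGet? ((pvGet? model_2_samples p.1).getD []) "has_failed").getD false
  if f1 && f2 then (bf ++ [p.1], m1f, m2f, bp)
  else if f1 then (bf, m1f ++ [p.1], m2f, bp)
  else if f2 then (bf, m1f, m2f ++ [p.1], bp)
  else (bf, m1f, m2f, bp ++ [p.1])

def get_analysis_results (model_1_samples : List (String × List (String × Bool))) (model_2_samples : List (String × List (String × Bool))) : List (String × List String) :=
  let (bf, m1f, m2f, bp) := model_1_samples.foldl (pvStepA model_2_samples) ([], [], [], [])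
  [("both_failed", bf), ("model_1_failed", m1f), ("model_2_failed", m2f), ("both_passed", bp)]

-- ===== PORT B =====
def pvF1 (r : List (String × Bool)) : Bool := (pvGet? r "has_failed").getD false

def pvF2 (model_2_samples : List (String × List (String × Bool))) (sid : String) : Bool :=
  (pvGet? ((pvGet? model_2_samples sid).getD []) "has_failed").getD false

def get_analysis_results_alt (model_1_samples : List (String × List (String × Bool))) (model_2_samples : List (String × List (String × Bool))) : List (String × List String) :=
  [("both_failed",
      (model_1_samples.filter fun p => pvF1 p.2 && pvF2 model_2_samples p.1).map Prod.fst),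
   ("model_1_failed",
      (model_1_samples.filter fun p => pvF1 p.2 && !(pvF2 model_2_samples p.1)).map Prod.fst),
   ("model_2_failed",
      (model_1_samples.filter fun p => !(pvF1 p.2) && pvF2 model_2_samples p.1).map Prod.fst),
   ("both_passed",
      (model_1_samples.filter fun p => !(pvF1 p.2) && !(pvF2 model_2_samples p.1)).map Prod.fst)]

-- ===== PRECONDITION & SPEC =====
-- Pre_ excludes exactly the inputs where Python A raises KeyError: every value dict of
-- model_1_samples must have key "has_failed", and every key of model_1_samples must occur in
-- model_2_samples with a value dict that has key "has_failed".
def Pre_get_analysis_results (model_1_samples : List (String × List (String × Bool))) (model_2_samples : List (String × List (String × Bool))) : Prop :=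
  ∀ p ∈ model_1_samples,
    "has_failed" ∈ p.2.map Prod.fst ∧
    p.1 ∈ model_2_samples.map Prod.fst ∧
    ∀ q ∈ model_2_samples, q.1 = p.1 → "has_failed" ∈ q.2.map Prod.fst

instance (model_1_samples : List (String × List (String × Bool))) (model_2_samples : List (String × List (String × Bool))) : Decidable (Pre_get_analysis_results model_1_samples model_2_samples) := by unfold Pre_get_analysis_results; infer_instance

def pvWitness_get_analysis_results : (List (String × List (String × Bool))) × (List (String × List (String × Bool))) :=
  ([("a", [("has_failed", true)]), ("b", [("has_failed", false)])],
   [("a", [("has_failed", false)]), ("b", [("has_failed", false)])])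

def Spec_get_analysis_results (model_1_samples : List (String × List (String × Bool))) (model_2_samples : List (String × List (String × Bool))) (out : List (String × List String)) : Prop := out = get_analysis_results_alt model_1_samples model_2_samples
instance (model_1_samples : List (String × List (String × Bool))) (model_2_samples : List (String × List (String × Bool))) (out : List (String × List String)) : Decidable (Spec_get_analysis_results model_1_samples model_2_samples out) := by unfold Spec_get_analysis_results; infer_instance

-- ===== CLAIM (what is proved, stated in full; the proofs are below) =====
def Claim_equal_get_analysis_results : Prop := ∀ (model_1_samples : List (String × List (String × Bool))) (model_2_samples : List (String × List (String × Bool))), Dom_get_analysis_results model_1_samples model_2_samples → Pre_get_analysis_results model_1_samples model_2_samples → Spec_get_analysis_results model_1_samples model_2_samples (get_analysis_results model_1_samples model_2_samples)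

-- ===== LEMMAS AND PROOFS =====

-- A's fold with arbitrary accumulators appends exactly B's four filtered passes
theorem pvStepA_fold (m2 : List (String × List (String × Bool))) :
    ∀ (m1 : List (String × List (String × Bool))) (bf m1f m2f bp : List String),
      m1.foldl (pvStepA m2) (bf, m1f, m2f, bp) =
      (bf ++ (m1.filter fun p => pvF1 p.2 && pvF2 m2 p.1).map Prod.fst,
       m1f ++ (m1.filter fun p => pvF1 p.2 && !(pvF2 m2 p.1)).map Prod.fst,
       m2f ++ (m1.filter fun p => !(pvF1 p.2) && pvF2 m2 p.1).map Prod.fst,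
       bp ++ (m1.filter fun p => !(pvF1 p.2) && !(pvF2 m2 p.1)).map Prod.fst) := by
  intro m1
  induction m1 with
  | nil => simp
  | cons p rest ih =>
    intro bf m1f m2f bp
    rw [List.foldl_cons]
    cases h1 : (pvGet? p.2 "has_failed").getD false <;>
      cases h2 : (pvGet? ((pvGet? m2 p.1).getD []) "has_failed").getD false <;>
        simp [pvStepA, pvF1, pvF2, h1, h2, ih, List.append_assoc]

-- ===== VERDICT (by name: the statement is the Claim_ definition above) =====
theorem get_analysis_results_spec : Claim_equal_get_analysis_results := by
  intro m1 m2 _ _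
  unfold Spec_get_analysis_results get_analysis_results get_analysis_results_alt
  rw [pvStepA_fold]
  simp
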